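-- pv_equiv track=rewrite | github.com/MichielMortier/AdventOfCode2020 | Python/oef20.py | rotate_tile
-- ===== SOURCE A (Python) =====
-- import copy
--
-- def rotate_tile(tile, current_index, index_to_go, pattern_to_match):
--     # do rotation to bring current side to the side we need => e g size on index 1  needs to be on index 2
--     for _ in range(0, ((index_to_go - current_index) % 4)):
--         copy_tile = copy.deepcopy(tile)
--         tile[0] = copy_tile[3][::-1]
--         tile[1] = copy_tile[0][::1]
--         tile[2] = copy_tile[1][::-1]
--         tile[3] = copy_tile[2][::1]
--     # it the pattern does not match, we need to inverse the pattern
--     if pattern_to_match != tile[index_to_go]: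
--         tile[index_to_go] = tile[index_to_go][::-1]
--         tile[index_to_go - 2] = tile[index_to_go - 2][::-1]
--         tile[(index_to_go - 1) % 4], tile[(index_to_go + 1) % 4] = tile[(index_to_go + 1) % 4], tile[
--             (index_to_go - 1) % 4]
--     return tile
-- ===== SOURCE B (Python) =====
-- def rotate_tile(tile, current_index, index_to_go, pattern_to_match):
--     # closed-form rotation: pick the final arrangement of the four edges directly
--     # from n = number of rotations mod 4, instead of looping with a deepcopy per turn
--     n = (index_to_go - current_index) % 4
--     if n:
--         a, b, c, d = tile[0], tile[1], tile[2], tile[3]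
--         if n == 1:
--             tile[0], tile[1], tile[2], tile[3] = d[::-1], a, b[::-1], c
--         elif n == 2:
--             tile[0], tile[1], tile[2], tile[3] = c[::-1], d[::-1], a[::-1], b[::-1]
--         else:
--             tile[0], tile[1], tile[2], tile[3] = b, c[::-1], d, a[::-1]
--     # if the pattern does not match, we need to inverse the pattern
--     if pattern_to_match != tile[index_to_go]:
--         tile[index_to_go] = tile[index_to_go][::-1]
--         tile[index_to_go - 2] = tile[index_to_go - 2][::-1]
--         tile[(index_to_go - 1) % 4], tile[(index_to_go + 1) % 4] = tile[(index_to_go + 1) % 4], tile[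
--             (index_to_go - 1) % 4]
--     return tile
-- ===== Notes on version B (the rewrite author's own statement) =====
-- stated objective: simpler
-- what changed: Replaces the rotation loop, which deep-copies the tile on every iteration, by a single closed-form dispatch on n = (index_to_go - current_index) % 4 that assigns the four rotated edges at once; the trailing pattern-mismatch flip block is kept.
import Mathlib
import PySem

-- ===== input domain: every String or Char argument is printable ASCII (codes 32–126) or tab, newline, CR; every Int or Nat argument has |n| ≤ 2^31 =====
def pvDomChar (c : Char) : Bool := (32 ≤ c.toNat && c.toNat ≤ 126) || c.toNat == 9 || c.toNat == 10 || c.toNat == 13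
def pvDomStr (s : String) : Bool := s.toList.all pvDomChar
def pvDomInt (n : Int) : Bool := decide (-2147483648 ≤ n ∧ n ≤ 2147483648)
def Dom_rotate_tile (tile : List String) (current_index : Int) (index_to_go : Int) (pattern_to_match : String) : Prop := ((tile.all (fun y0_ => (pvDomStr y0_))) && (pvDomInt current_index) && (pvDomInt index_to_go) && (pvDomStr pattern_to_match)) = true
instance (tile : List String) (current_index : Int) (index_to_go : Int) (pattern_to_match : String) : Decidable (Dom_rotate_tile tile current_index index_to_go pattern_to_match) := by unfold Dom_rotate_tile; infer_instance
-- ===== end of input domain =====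

-- B replaces A's rotation loop (one deepcopy per iteration) by a single closed-form dispatch on
-- n = (index_to_go - current_index) % 4 and keeps the trailing pattern-mismatch flip block;
-- both Pythons mutate `tile` in place identically, the theorems here are about the returned value.


-- s[::-1] (primitive wrapper shared by both ports)
def srev (s : String) : String := (PySem.Str.slice? s none none (-1)).getD s

-- the trailing pattern-mismatch flip block, textually identical in both Pythons, ported once and
-- used by both ports (pyGetD/pySetD defaults are never reached inside Pre_; outside Pre_ Python raises)
def flip_mismatch (tile : List String) (index_to_go : Int) (pattern_to_match : String) : List String :=
  if pattern_to_match ≠ PySem.List.pyGetD tile index_to_go "" then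
    let tile := PySem.List.pySetD tile index_to_go (srev (PySem.List.pyGetD tile index_to_go ""))
    let tile := PySem.List.pySetD tile (index_to_go - 2) (srev (PySem.List.pyGetD tile (index_to_go - 2) ""))
    -- simultaneous swap: both right-hand sides are read before either assignment
    let vl := PySem.List.pyGetD tile (PySem.Int.mod (index_to_go + 1) 4) ""
    let vr := PySem.List.pyGetD tile (PySem.Int.mod (index_to_go - 1) 4) ""
    let tile := PySem.List.pySetD tile (PySem.Int.mod (index_to_go - 1) 4) vl
    let tile := PySem.List.pySetD tile (PySem.Int.mod (index_to_go + 1) 4) vr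
    tile
  else tile

-- ===== PORT A =====
-- one iteration of A's rotation loop: copy_tile = deepcopy(tile); tile[0..3] reassigned from copy_tile
def rotA_step (tile : List String) : List String :=
  let copy_tile := tile
  let tile := PySem.List.pySetD tile 0 (srev (PySem.List.pyGetD copy_tile 3 ""))
  let tile := PySem.List.pySetD tile 1 (PySem.List.pyGetD copy_tile 0 "")   -- [::1] is the identity slice
  let tile := PySem.List.pySetD tile 2 (srev (PySem.List.pyGetD copy_tile 1 ""))
  let tile := PySem.List.pySetD tile 3 (PySem.List.pyGetD copy_tile 2 "")
  tile

def rotate_tile (tile : List String) (current_index : Int) (index_to_go : Int) (pattern_to_match : String) : List String :=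
  let tile := (PySem.List.pyRange 0 (PySem.Int.mod (index_to_go - current_index) 4) 1).foldl
                (fun t _ => rotA_step t) tile
  flip_mismatch tile index_to_go pattern_to_match

-- ===== PORT B =====
def rotate_tile_alt (tile : List String) (current_index : Int) (index_to_go : Int) (pattern_to_match : String) : List String :=
  let n := PySem.Int.mod (index_to_go - current_index) 4
  let tile :=
    if n == 0 then tile
    else
      let a := PySem.List.pyGetD tile 0 ""
      let b := PySem.List.pyGetD tile 1 ""
      let c := PySem.List.pyGetD tile 2 ""
      let d := PySem.List.pyGetD tile 3 ""
      if n == 1 then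
        PySem.List.pySetD (PySem.List.pySetD (PySem.List.pySetD (PySem.List.pySetD tile 0 (srev d)) 1 a) 2 (srev b)) 3 c
      else if n == 2 then
        PySem.List.pySetD (PySem.List.pySetD (PySem.List.pySetD (PySem.List.pySetD tile 0 (srev c)) 1 (srev d)) 2 (srev a)) 3 (srev b)
      else
        PySem.List.pySetD (PySem.List.pySetD (PySem.List.pySetD (PySem.List.pySetD tile 0 b) 1 (srev c)) 2 d) 3 (srev a)
  flip_mismatch tile index_to_go pattern_to_match

-- ===== PRECONDITION & SPEC =====
-- Pre_ is exactly the closed-form guarantee that A returns: index_to_go is a valid index, a tile with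
-- ≥ 4 edges whenever the rotation loop runs, and the three flip indices in range (so the mismatch
-- branch cannot raise), or — when no rotation happens — the pattern already matches so no flip occurs.
-- It excludes a few inputs on which A still returns: flip indices out of range but the rotated edge
-- happens to match the pattern, so the flip is never taken (see the cite; A and B agree there too).
def Pre_rotate_tile (tile : List String) (current_index : Int) (index_to_go : Int) (pattern_to_match : String) : Prop :=
  PySem.Raise.InRange tile.length index_to_go ∧
  ((PySem.Int.mod (index_to_go - current_index) 4 = 0 ∧
      pattern_to_match = PySem.List.pyGetD tile index_to_go "") ∨
   ((PySem.Int.mod (index_to_go - current_index) 4 = 0 ∨ 4 ≤ tile.length) ∧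
      PySem.Raise.InRange tile.length (index_to_go - 2) ∧
      PySem.Int.mod (index_to_go - 1) 4 < (tile.length : Int) ∧
      PySem.Int.mod (index_to_go + 1) 4 < (tile.length : Int)))
instance (tile : List String) (current_index : Int) (index_to_go : Int) (pattern_to_match : String) : Decidable (Pre_rotate_tile tile current_index index_to_go pattern_to_match) := by unfold Pre_rotate_tile; infer_instance

def pvWitness_rotate_tile : List String × Int × Int × String := (["ab", "cd", "ef", "gh"], 1, 2, "cd")

def Spec_rotate_tile (tile : List String) (current_index : Int) (index_to_go : Int) (pattern_to_match : String) (out : List String) : Prop := out = rotate_tile_alt tile current_index index_to_go pattern_to_match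
instance (tile : List String) (current_index : Int) (index_to_go : Int) (pattern_to_match : String) (out : List String) : Decidable (Spec_rotate_tile tile current_index index_to_go pattern_to_match out) := by unfold Spec_rotate_tile; infer_instance

-- ===== CLAIM (what is proved, stated in full; the proofs are below) =====
def Claim_equal_rotate_tile : Prop := ∀ (tile : List String) (current_index : Int) (index_to_go : Int) (pattern_to_match : String), Dom_rotate_tile tile current_index index_to_go pattern_to_match → Pre_rotate_tile tile current_index index_to_go pattern_to_match → Spec_rotate_tile tile current_index index_to_go pattern_to_match (rotate_tile tile current_index index_to_go pattern_to_match)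

-- ===== LEMMAS AND PROOFS =====

theorem srev_srev (s : String) : srev (srev s) = s := by
  simp [srev, PySem.Str.slice?_none_none_neg_one]

-- pyGetD / pySetD evaluated at indices 0..3 on a tile with at least four edges
theorem getC0 (a b c d : String) (r : List String) : PySem.List.pyGetD (a :: b :: c :: d :: r) 0 "" = a := by
  rw [PySem.List.pyGetD_eq_getElem _ _ (by norm_num) (by simp; omega)]; rfl
theorem getC1 (a b c d : String) (r : List String) : PySem.List.pyGetD (a :: b :: c :: d :: r) 1 "" = b := by
  rw [PySem.List.pyGetD_eq_getElem _ _ (by norm_num) (by simp; omega)]; rfl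
theorem getC2 (a b c d : String) (r : List String) : PySem.List.pyGetD (a :: b :: c :: d :: r) 2 "" = c := by
  rw [PySem.List.pyGetD_eq_getElem _ _ (by norm_num) (by simp; omega)]; rfl
theorem getC3 (a b c d : String) (r : List String) : PySem.List.pyGetD (a :: b :: c :: d :: r) 3 "" = d := by
  rw [PySem.List.pyGetD_eq_getElem _ _ (by norm_num) (by simp; omega)]; rfl
theorem setC0 (a b c d v : String) (r : List String) : PySem.List.pySetD (a :: b :: c :: d :: r) 0 v = v :: b :: c :: d :: r := by
  rw [PySem.List.pySetD_of_nonneg _ _ (by norm_num)]; rfl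
theorem setC1 (a b c d v : String) (r : List String) : PySem.List.pySetD (a :: b :: c :: d :: r) 1 v = a :: v :: c :: d :: r := by
  rw [PySem.List.pySetD_of_nonneg _ _ (by norm_num)]; rfl
theorem setC2 (a b c d v : String) (r : List String) : PySem.List.pySetD (a :: b :: c :: d :: r) 2 v = a :: b :: v :: d :: r := by
  rw [PySem.List.pySetD_of_nonneg _ _ (by norm_num)]; rfl
theorem setC3 (a b c d v : String) (r : List String) : PySem.List.pySetD (a :: b :: c :: d :: r) 3 v = a :: b :: c :: v :: r := by
  rw [PySem.List.pySetD_of_nonneg _ _ (by norm_num)]; rfl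

-- one rotation step of A evaluated on a tile with at least four edges
theorem stepE (a b c d : String) (r : List String) :
    rotA_step (a :: b :: c :: d :: r) = srev d :: a :: srev b :: c :: r := by
  simp only [rotA_step]
  rw [getC3, getC0, getC1, getC2, setC0, setC1, setC2, setC3]

-- A's rotation loop evaluated for 1..3 iterations on a tile with at least four edges
theorem loopE1 (a b c d : String) (r : List String) :
    List.foldl (fun t (_ : Int) => rotA_step t) (a :: b :: c :: d :: r) (PySem.List.pyRange 0 1 1)
      = srev d :: a :: srev b :: c :: r := by
  rw [show PySem.List.pyRange 0 1 1 = [0] from by decide]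
  simp only [List.foldl]
  rw [stepE]
theorem loopE2 (a b c d : String) (r : List String) :
    List.foldl (fun t (_ : Int) => rotA_step t) (a :: b :: c :: d :: r) (PySem.List.pyRange 0 2 1)
      = srev c :: srev d :: srev a :: srev b :: r := by
  rw [show PySem.List.pyRange 0 2 1 = [0, 1] from by decide]
  simp only [List.foldl]
  rw [stepE, stepE]
theorem loopE3 (a b c d : String) (r : List String) :
    List.foldl (fun t (_ : Int) => rotA_step t) (a :: b :: c :: d :: r) (PySem.List.pyRange 0 3 1)
      = b :: srev c :: d :: srev a :: r := by
  rw [show PySem.List.pyRange 0 3 1 = [0, 1, 2] from by decide]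
  simp only [List.foldl]
  rw [stepE, stepE, stepE, srev_srev, srev_srev]

-- ===== VERDICT (by name: the statement is the Claim_ definition above) =====
set_option maxHeartbeats 1000000 in
theorem rotate_tile_spec : Claim_equal_rotate_tile := by
  intro tile ci ig pat _hDom hPre
  obtain ⟨hIR, hbr⟩ := hPre
  unfold Spec_rotate_tile
  simp only [rotate_tile, rotate_tile_alt]
  have hk0 : 0 ≤ PySem.Int.mod (ig - ci) 4 := PySem.Int.mod_nonneg _ (by omega)
  have hk4 : PySem.Int.mod (ig - ci) 4 < 4 := PySem.Int.mod_lt _ (by omega)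
  have hcase : PySem.Int.mod (ig - ci) 4 = 0 ∨ PySem.Int.mod (ig - ci) 4 = 1 ∨
      PySem.Int.mod (ig - ci) 4 = 2 ∨ PySem.Int.mod (ig - ci) 4 = 3 := by omega
  rcases hcase with h | h | h | h
  · -- no rotation: both sides feed the unchanged tile to the flip block
    rw [h]
    norm_num [show PySem.List.pyRange 0 0 1 = ([] : List Int) from by decide]
  · -- one rotation: Pre_ forces at least four edges
    have hL : 4 ≤ tile.length := by
      rcases hbr with ⟨h0, _⟩ | ⟨h04, _⟩
      · omega
      · rcases h04 with h0 | hL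
        · omega
        · exact hL
    rcases tile with _ | ⟨a, _ | ⟨b, _ | ⟨c, _ | ⟨d, r⟩⟩⟩⟩ <;> simp at hL
    rw [h, loopE1]
    norm_num [getC0, getC1, getC2, getC3, setC0, setC1, setC2, setC3]
  · -- two rotations
    have hL : 4 ≤ tile.length := by
      rcases hbr with ⟨h0, _⟩ | ⟨h04, _⟩
      · omega
      · rcases h04 with h0 | hL
        · omega
        · exact hL
    rcases tile with _ | ⟨a, _ | ⟨b, _ | ⟨c, _ | ⟨d, r⟩⟩⟩⟩ <;> simp at hL
    rw [h, loopE2]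
    norm_num [getC0, getC1, getC2, getC3, setC0, setC1, setC2, setC3]
  · -- three rotations
    have hL : 4 ≤ tile.length := by
      rcases hbr with ⟨h0, _⟩ | ⟨h04, _⟩
      · omega
      · rcases h04 with h0 | hL
        · omega
        · exact hL
    rcases tile with _ | ⟨a, _ | ⟨b, _ | ⟨c, _ | ⟨d, r⟩⟩⟩⟩ <;> simp at hL
    rw [h, loopE3]
    norm_num [getC0, getC1, getC2, getC3, setC0, setC1, setC2, setC3]
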